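-- pv_equiv track=rewrite | github.com/CliffHanger201/3rd_Year_Dissertation_Project | python_hyper_heuristic/domains/Python/TSP/TSPBasicAlgorithms.py | verify_permutation
-- ===== SOURCE A (Python) =====
-- from typing import List, Optional, Sequence, Tuple
--
-- def verify_permutation(p: Sequence[int], n: int) -> bool:
--     if len(p) != n:
--         return False
--     included = [False] * n
--     for v in p:
--         if v < 0 or v >= n:
--             return False
--         if included[v]:
--             return False
--         included[v] = True
--     return all(included)
-- ===== SOURCE B (Python) =====
-- def verify_permutation(p, n):
--     return len(p) == n and sorted(p) == list(range(n))
-- ===== Notes on version B (the rewrite author's own statement) =====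
-- stated objective: simpler
-- what changed: Replaced the single pass that maintains a boolean presence array (with range/duplicate checks and a final all()) by a one-line sort-and-compare against list(range(n)).
import Mathlib
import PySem

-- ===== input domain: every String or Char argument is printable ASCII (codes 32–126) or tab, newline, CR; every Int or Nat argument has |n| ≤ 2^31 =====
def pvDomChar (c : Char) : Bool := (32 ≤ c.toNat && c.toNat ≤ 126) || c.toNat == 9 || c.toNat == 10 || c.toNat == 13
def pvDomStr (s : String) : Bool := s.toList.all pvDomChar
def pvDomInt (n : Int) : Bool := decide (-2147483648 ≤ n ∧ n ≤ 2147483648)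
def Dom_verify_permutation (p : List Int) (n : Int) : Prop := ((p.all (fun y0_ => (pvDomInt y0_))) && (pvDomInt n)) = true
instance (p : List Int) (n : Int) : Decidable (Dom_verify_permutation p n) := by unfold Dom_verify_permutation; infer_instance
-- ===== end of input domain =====

-- B replaces A's boolean presence-array single pass by sort-and-compare against range(n); objective: simpler.

-- ===== PORT A =====
-- A's for-loop over p with the mutable `included` array: early return on
-- out-of-range or duplicate values, `all(included)` at the end.
-- `included[v]` is read/written at index v.toNat; the guard ensures 0 ≤ v < n
-- before any access, so getD/set are exact for Python's indexing here.
def vpLoop (n : Int) : List Int → List Bool → Bool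
  | [], inc => inc.all id
  | v :: rest, inc =>
    if v < 0 || n ≤ v then false
    else if inc.getD v.toNat false then false
    else vpLoop n rest (inc.set v.toNat true)

def verify_permutation (p : List Int) (n : Int) : Bool :=
  if (p.length : Int) ≠ n then false
  else vpLoop n p (List.replicate n.toNat false)

-- ===== PORT B =====
def verify_permutation_alt (p : List Int) (n : Int) : Bool :=
  (p.length : Int) == n && PySem.List.sorted p id false == PySem.List.pyRange 0 n 1

-- ===== PRECONDITION & SPEC =====
def Spec_verify_permutation (p : List Int) (n : Int) (out : Bool) : Prop := out = verify_permutation_alt p n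
instance (p : List Int) (n : Int) (out : Bool) : Decidable (Spec_verify_permutation p n out) := by unfold Spec_verify_permutation; infer_instance

-- ===== CLAIM (what is proved, stated in full; the proofs are below) =====
def Claim_equal_verify_permutation : Prop := ∀ (p : List Int) (n : Int), Dom_verify_permutation p n → Spec_verify_permutation p n (verify_permutation p n)

-- ===== LEMMAS AND PROOFS =====

-- the marking effect of A's loop on `included`
def vpMark (inc : List Bool) (l : List Int) : List Bool :=
  l.foldl (fun a v => a.set v.toNat true) inc

lemma vpMark_length (l : List Int) : ∀ inc : List Bool, (vpMark inc l).length = inc.length := by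
  induction l with
  | nil => intro inc; rfl
  | cons v rest ih =>
    intro inc
    show (vpMark (inc.set v.toNat true) rest).length = _
    rw [ih]; simp

lemma getD_set' (l : List Bool) (i j : Nat) :
    (l.set i true).getD j false = if i = j ∧ i < l.length then true else l.getD j false := by
  simp only [List.getD_eq_getElem?_getD, List.getElem?_set]
  split_ifs <;> simp_all
  omega

lemma vpMark_getD (l : List Int) : ∀ (inc : List Bool) (i : Nat), i < inc.length →
    ((vpMark inc l).getD i false = (inc.getD i false || l.any (fun v => v.toNat == i))) := by
  induction l with
  | nil => intro inc i _; simp [vpMark]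
  | cons v rest ih =>
    intro inc i hi
    show (vpMark (inc.set v.toNat true) rest).getD i false = _
    rw [ih _ i (by simpa using hi), getD_set']
    by_cases hv : v.toNat = i
    · simp [hv, hi]
    · have hb : (v.toNat == i) = false := beq_eq_false_iff_ne.mpr hv
      simp [List.any_cons, hb, hv]

lemma all_id_iff (l : List Bool) :
    l.all id = true ↔ ∀ i, i < l.length → l.getD i false = true := by
  rw [List.all_eq_true]
  constructor
  · intro h i hi
    rw [List.getD_eq_getElem?_getD, List.getElem?_eq_getElem hi]
    exact h _ (List.getElem_mem hi)
  · intro h x hx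
    obtain ⟨i, hi, rfl⟩ := List.mem_iff_getElem.mp hx
    have := h i hi
    rwa [List.getD_eq_getElem?_getD, List.getElem?_eq_getElem hi] at this

lemma vpLoop_iff (n : Int) (l : List Int) : ∀ inc : List Bool, n.toNat ≤ inc.length →
    (vpLoop n l inc = true ↔
      (∀ v ∈ l, 0 ≤ v ∧ v < n) ∧ l.Nodup ∧
      (∀ v ∈ l, inc.getD v.toNat false = false) ∧ (vpMark inc l).all id = true) := by
  induction l with
  | nil => intro inc _; simp [vpLoop, vpMark]
  | cons v rest ih =>
    intro inc hlen
    by_cases hr : v < 0 || n ≤ v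
    · rw [vpLoop, if_pos hr]
      simp only [Bool.or_eq_true, decide_eq_true_eq] at hr
      constructor
      · intro h; cases h
      · rintro ⟨hran, -⟩
        rcases hran v (by simp) with ⟨h0, h1⟩
        omega
    · simp only [Bool.or_eq_true, decide_eq_true_eq, not_or, not_lt, not_le] at hr
      obtain ⟨h0, h1⟩ := hr
      have hvlt : v.toNat < inc.length := by omega
      by_cases hd : inc.getD v.toNat false = true
      · rw [vpLoop, if_neg (by simp; omega), if_pos hd]
        constructor
        · intro h; cases h
        · rintro ⟨-, -, hfresh, -⟩
          have := hfresh v (by simp)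
          rw [this] at hd; cases hd
      · rw [vpLoop, if_neg (by simp; omega), if_neg hd]
        rw [ih _ (by simpa using hlen)]
        have hmark : vpMark inc (v :: rest) = vpMark (inc.set v.toNat true) rest := rfl
        rw [Bool.not_eq_true] at hd
        constructor
        · rintro ⟨hran, hnd, hfresh, hall⟩
          refine ⟨?_, ?_, ?_, by rw [hmark]; exact hall⟩
          · intro w hw
            rcases List.mem_cons.mp hw with rfl | hw
            · exact ⟨h0, h1⟩
            · exact hran w hw
          · rw [List.nodup_cons]
            refine ⟨?_, hnd⟩
            intro hv
            have := hfresh v hv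
            rw [getD_set'] at this
            simp [hvlt] at this
          · intro w hw
            rcases List.mem_cons.mp hw with rfl | hw
            · exact hd
            · have := hfresh w hw
              rw [getD_set'] at this
              split_ifs at this with h
              rwa [List.getD_eq_getElem?_getD]
        · rintro ⟨hran, hnd, hfresh, hall⟩
          refine ⟨fun w hw => hran w (by simp [hw]), (List.nodup_cons.mp hnd).2, ?_,
            by rw [hmark] at hall; exact hall⟩
          intro w hw
          rw [getD_set']
          split_ifs with h
          · exfalso
            rw [List.nodup_cons] at hnd
            rcases hran w (by simp [hw]) with ⟨hw0, _⟩
            have : w = v := by omega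
            exact hnd.1 (this ▸ hw)
          · exact hfresh w (by simp [hw])

lemma getD_replicate_false (m i : Nat) : (List.replicate m false).getD i false = false := by
  rw [List.getD_eq_getElem?_getD, List.getElem?_replicate]
  split_ifs <;> rfl

-- A returns true (given len(p) == n) iff p is a permutation of range(n)
lemma A_char (p : List Int) (n : Int) (hlen : (p.length : Int) = n) :
    verify_permutation p n = true ↔ p.Perm (PySem.List.pyRange 0 n 1) := by
  have hn0 : 0 ≤ n := by omega
  rw [verify_permutation, if_neg (by omega),
    vpLoop_iff n p (List.replicate n.toNat false) (by simp)]
  constructor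
  · rintro ⟨hran, hnd, -, -⟩
    have hsub : p ⊆ PySem.List.pyRange 0 n 1 := by
      intro v hv
      rcases hran v hv with ⟨h0, h1⟩
      exact PySem.List.mem_pyRange_one.mpr ⟨h0, h1⟩
    exact (hnd.subperm hsub).perm_of_length_le
      (by rw [PySem.List.length_pyRange_one]; omega)
  · intro hperm
    refine ⟨?_, hperm.nodup_iff.mpr (PySem.List.nodup_pyRange_one 0 n), ?_, ?_⟩
    · intro v hv
      have := PySem.List.mem_pyRange_one.mp (hperm.mem_iff.mp hv)
      exact ⟨this.1, this.2⟩
    · intro v _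
      exact getD_replicate_false _ _
    · rw [all_id_iff]
      intro i hi
      rw [vpMark_length, List.length_replicate] at hi
      rw [vpMark_getD p _ i (by simpa using hi), getD_replicate_false]
      have hmem : (i : Int) ∈ p := by
        apply hperm.mem_iff.mpr
        apply PySem.List.mem_pyRange_one.mpr
        constructor
        · exact Int.natCast_nonneg i
        · omega
      simp only [Bool.false_or, List.any_eq_true]
      exact ⟨(i : Int), hmem, by simp⟩

-- B returns true (given len(p) == n) iff p is a permutation of range(n)
lemma B_char (p : List Int) (n : Int) (hlen : (p.length : Int) = n) :
    verify_permutation_alt p n = true ↔ p.Perm (PySem.List.pyRange 0 n 1) := by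
  rw [verify_permutation_alt]
  simp only [hlen, BEq.rfl, Bool.true_and, beq_iff_eq]
  constructor
  · intro h
    have := PySem.List.sorted_perm p (id : Int → Int) false
    rw [h] at this
    exact this.symm
  · intro hperm
    exact PySem.List.sorted_eq_of_perm_of_pairwise_lt p _ id hperm.symm
      (by simpa using PySem.List.pairwise_lt_pyRange_one 0 n)

-- ===== VERDICT (by name: the statement is the Claim_ definition above) =====
theorem verify_permutation_spec : Claim_equal_verify_permutation := by
  intro p n _
  unfold Spec_verify_permutation
  by_cases h : (p.length : Int) = n
  · have := (A_char p n h).trans (B_char p n h).symm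
    cases hA : verify_permutation p n <;> cases hB : verify_permutation_alt p n <;> simp_all
  · rw [verify_permutation, if_pos h, verify_permutation_alt]
    simp [h]
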